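-- pv_equiv track=rewrite | github.com/gabrielemongirdaite/advent_of_code_2025 | day2.py | if_valid_part_2
-- ===== SOURCE A (Python) =====
-- def if_valid_part_2(r):
--     r_str = str(r)
--     if len(r_str) == 1:
--         return 0
--     else:
--         for i in range(1, len(r_str)):
--             if len(r_str) % i != 0:
--                 pass
--             else:
--                 parts = [r_str[k:k + i] for k in range(0, len(r_str), i)]
--                 if len(parts) > 1 and len(set(parts)) == 1:
--                     return r
--     return 0
-- ===== SOURCE B (Python) =====
-- def if_valid_part_2(r):
--     s = str(r)
--     if len(s) == 1:
--         return 0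
--     return r if s in (s + s)[1:-1] else 0
-- ===== Notes on version B (the rewrite author's own statement) =====
-- stated objective: simpler
-- what changed: Replaces the divisor-length enumeration with chunk-list building and set-equality checking by the classic string-doubling periodicity test s in (s+s)[1:-1], which holds exactly when the digit string is a repetition of a shorter block.
import Mathlib
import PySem

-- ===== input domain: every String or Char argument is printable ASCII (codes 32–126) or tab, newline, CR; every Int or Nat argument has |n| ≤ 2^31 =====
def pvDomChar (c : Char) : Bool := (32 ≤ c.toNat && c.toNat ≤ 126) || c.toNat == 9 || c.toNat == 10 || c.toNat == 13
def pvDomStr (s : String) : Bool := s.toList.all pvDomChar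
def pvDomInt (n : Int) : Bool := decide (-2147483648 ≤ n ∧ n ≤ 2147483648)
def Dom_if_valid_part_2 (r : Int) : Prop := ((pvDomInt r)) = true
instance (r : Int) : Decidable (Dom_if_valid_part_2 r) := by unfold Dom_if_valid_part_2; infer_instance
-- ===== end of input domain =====

-- B replaces A's divisor enumeration with chunk lists and a set-equality check by the
-- string-doubling periodicity test s in (s+s)[1:-1] (simpler; same return values).

-- ===== PORT A =====
-- parts = [r_str[k:k + i] for k in range(0, len(r_str), i)]
def pvPartsA (cs : List Char) (i : Int) : List (List Char) :=
  (PySem.List.pyRange 0 (PySem.List.len cs) i).map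
    (fun k => PySem.List.slice cs (some k) (some (k + i)))

-- the 'for i in range(1, len(r_str))' loop: r at the first good i, else 0
def pvLoopA (r : Int) (cs : List Char) : List Int → Int
  | [] => 0
  | i :: rest =>
    if PySem.Int.mod (PySem.List.len cs) i ≠ 0 then pvLoopA r cs rest
    else if 1 < PySem.List.len (pvPartsA cs i) ∧
            PySem.Set.len (PySem.Set.ofList (pvPartsA cs i)) = 1 then r
    else pvLoopA r cs rest

def if_valid_part_2 (r : Int) : Int :=
  let cs := PySem.Int.toChars r
  if PySem.List.len cs = 1 then 0
  else pvLoopA r cs (PySem.List.pyRange 1 (PySem.List.len cs) 1)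

-- ===== PORT B =====
def if_valid_part_2_alt (r : Int) : Int :=
  let cs := PySem.Int.toChars r
  if PySem.List.len cs = 1 then 0
  else if PySem.Chars.isIn cs (PySem.List.slice (cs ++ cs) (some 1) (some (-1))) then r
  else 0

-- ===== PRECONDITION & SPEC =====
def Spec_if_valid_part_2 (r : Int) (out : Int) : Prop := out = if_valid_part_2_alt r
instance (r : Int) (out : Int) : Decidable (Spec_if_valid_part_2 r out) := by unfold Spec_if_valid_part_2; infer_instance

-- ===== CLAIM (what is proved, stated in full; the proofs are below) =====
def Claim_equal_if_valid_part_2 : Prop := ∀ (r : Int), Dom_if_valid_part_2 r → Spec_if_valid_part_2 r (if_valid_part_2 r)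

-- ===== LEMMAS AND PROOFS =====

-- str(r) is never empty
theorem pvTdcLen (b : Nat) : ∀ (fuel n : Nat) (ds : List Char), ds.length ≤ (Nat.toDigitsCore b fuel n ds).length := by
  intro fuel
  induction fuel with
  | zero => intro n ds; simp [Nat.toDigitsCore]
  | succ f ih =>
    intro n ds
    unfold Nat.toDigitsCore
    dsimp only
    split
    · simp
    · exact le_trans (by simp) (ih _ _)

theorem pvToCharsNeNil (r : Int) : PySem.Int.toChars r ≠ [] := by
  have h : ∀ m : Nat, 1 ≤ (Nat.toDigits 10 m).length := by
    intro m
    unfold Nat.toDigits Nat.toDigitsCore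
    dsimp only
    split
    · simp
    · exact le_trans (by simp) (pvTdcLen _ _ _ _)
  unfold PySem.Int.toChars
  split
  · simp
  · intro hc; have := h r.toNat; rw [hc] at this; simp at this

-- w repeated k times, and "cs is ≥ 2 copies of a nonempty block"
def pvWpow (w : List Char) (k : Nat) : List Char := (List.replicate k w).flatten

def pvPeriodic (cs : List Char) : Prop := ∃ w k, w ≠ [] ∧ 2 ≤ k ∧ cs = pvWpow w k

theorem pvWpow_succ (w : List Char) (k : Nat) : pvWpow w (k+1) = w ++ pvWpow w k := by
  simp [pvWpow, List.replicate_succ]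

theorem pvWpow_one (w : List Char) : pvWpow w 1 = w := by simp [pvWpow]

theorem pvWpow_add (w : List Char) (a b : Nat) : pvWpow w (a+b) = pvWpow w a ++ pvWpow w b := by
  unfold pvWpow; rw [List.replicate_add, List.flatten_append]

theorem pvLength_wpow (w : List Char) (k : Nat) : (pvWpow w k).length = k * w.length := by
  induction k with
  | zero => simp [pvWpow]
  | succ k ih => rw [pvWpow_succ]; simp [ih]; ring

theorem pvWpow_chunks (w : List Char) : ∀ (m k : Nat), m < k →
    ((pvWpow w k).drop (m * w.length)).take w.length = w := by
  intro m
  induction m with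
  | zero =>
    intro k hk
    obtain ⟨k', rfl⟩ : ∃ k', k = k' + 1 := ⟨k - 1, by omega⟩
    rw [pvWpow_succ]
    simp
  | succ m ih =>
    intro k hk
    obtain ⟨k', rfl⟩ : ∃ k', k = k' + 1 := ⟨k - 1, by omega⟩
    rw [pvWpow_succ]
    have h1 : (m + 1) * w.length = w.length + m * w.length := by ring
    rw [h1, List.drop_length_add_append]
    exact ih k' (by omega)
theorem pvChunks_wpow : ∀ (k : Nat) (w cs : List Char), cs.length = k * w.length →
    (∀ m < k, (cs.drop (m * w.length)).take w.length = w) → cs = pvWpow w k := by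
  intro k
  induction k with
  | zero =>
    intro w cs hlen _
    simp at hlen
    simp [pvWpow, hlen]
  | succ k ih =>
    intro w cs hlen hch
    have h0 : cs.take w.length = w := by
      have := hch 0 (by omega); simpa using this
    have hdrop : cs.drop w.length = pvWpow w k := by
      apply ih
      · rw [List.length_drop, hlen]; ring_nf; omega
      · intro m hm
        rw [List.drop_drop]
        have h3 : w.length + m * w.length = (m+1) * w.length := by ring
        rw [h3]
        exact hch (m+1) (by omega)
    rw [pvWpow_succ]
    conv_lhs => rw [← List.take_append_drop w.length cs]
    rw [h0, hdrop]

theorem pvCommPow : ∀ (n : Nat) (A t : List Char), A.length + t.length ≤ n → A ++ t = t ++ A →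
    ∃ w a b, A = pvWpow w a ∧ t = pvWpow w b ∧ (w = [] → A = []) := by
  intro n
  induction n with
  | zero =>
    intro A t h _
    have hA : A = [] := List.eq_nil_iff_length_eq_zero.mpr (by omega)
    have ht : t = [] := List.eq_nil_iff_length_eq_zero.mpr (by omega)
    exact ⟨[], 0, 0, by simp [hA, pvWpow], by simp [ht, pvWpow], fun _ => hA⟩
  | succ n ih =>
    intro A t hn h
    rcases le_or_gt A.length t.length with hle | hlt
    · by_cases hA : A = []
      · exact ⟨t, 0, 1, by simp [hA, pvWpow], by simp [pvWpow], fun _ => hA⟩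
      · have htake : t.take A.length = A := by
          have h1 : (A ++ t).take A.length = A := by simp
          have h2 : (t ++ A).take A.length = t.take A.length := List.take_append_of_le_length hle
          rw [h] at h1; rw [h2] at h1; exact h1
        set t' := t.drop A.length with ht'
        have ht2 : t = A ++ t' := by rw [← htake, ht']; exact (List.take_append_drop _ _).symm
        have hcomm : A ++ t' = t' ++ A := by
          have h3 : A ++ (A ++ t') = (A ++ t') ++ A := by rw [← ht2]; exact h
          rw [List.append_assoc] at h3
          exact List.append_cancel_left h3
        have hlen : A.length + t'.length ≤ n := by
          have hA1 : 1 ≤ A.length := by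
            rcases Nat.eq_zero_or_pos A.length with h0 | h1
            · exact absurd (List.eq_nil_iff_length_eq_zero.mpr h0) hA
            · exact h1
          have h4 : t'.length = t.length - A.length := by rw [ht']; simp
          omega
        obtain ⟨w, a, b, hwa, hwb, hcond⟩ := ih A t' hlen hcomm
        exact ⟨w, a, a + b, hwa, by rw [ht2, hwa, hwb, pvWpow_add], hcond⟩
    · by_cases ht : t = []
      · exact ⟨A, 1, 0, by simp [pvWpow], by simp [ht, pvWpow], fun h => h⟩
      · have htake : A.take t.length = t := by
          have h1 : (t ++ A).take t.length = t := by simp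
          have h2 : (A ++ t).take t.length = A.take t.length := List.take_append_of_le_length (by omega)
          rw [← h] at h1; rw [h2] at h1; exact h1
        set A' := A.drop t.length with hA'
        have hA2 : A = t ++ A' := by rw [← htake, hA']; exact (List.take_append_drop _ _).symm
        have hcomm : t ++ A' = A' ++ t := by
          have h3 : (t ++ A') ++ t = t ++ (t ++ A') := by rw [← hA2]; exact h
          rw [List.append_assoc] at h3
          exact (List.append_cancel_left h3).symm
        have hlen : t.length + A'.length ≤ n := by
          have ht1 : 1 ≤ t.length := by
            rcases Nat.eq_zero_or_pos t.length with h0 | h1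
            · exact absurd (List.eq_nil_iff_length_eq_zero.mpr h0) ht
            · exact h1
          have h4 : A'.length = A.length - t.length := by rw [hA']; simp
          omega
        obtain ⟨w, a, b, hwa, hwb, hcond⟩ := ih t A' hlen hcomm
        refine ⟨w, a + b, a, by rw [hA2, hwa, hwb, pvWpow_add], hwa, ?_⟩
        intro hw
        exact absurd (hcond hw) ht

-- slice [1:-1]
theorem pvSliceMid (xs : List Char) : PySem.List.slice xs (some 1) (some (-1)) = (xs.drop 1).take (xs.length - 2) := by
  by_cases hnil : xs = []
  · simp [hnil, PySem.List.slice, PySem.List.clampIdx]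
  · have h1 : 1 ≤ xs.length := List.length_pos_of_ne_nil hnil
    simp [PySem.List.slice, PySem.List.clampIdx, hnil]
    rw [show min 1 xs.length = 1 from by omega, List.drop_one]
    congr 1
    omega


theorem pvPartsA_eval (cs : List Char) (m q : Nat) (hm : 1 ≤ m) (hq1 : 1 ≤ q)
    (hq : cs.length = q * m) :
    pvPartsA cs (m : Int) = (List.range q).map (fun k => (cs.drop (k * m)).take m) := by
  unfold pvPartsA
  rw [PySem.List.len_eq, PySem.List.pyRange_of_pos 0 (cs.length : Int) (by exact_mod_cast hm)]
  have hcnt : (if (0:Int) < (cs.length : Int) then (((cs.length : Int) - 0 + m - 1) / m).toNat else 0) = q := by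
    rw [if_pos (by push_cast [hq]; positivity)]
    have e : ((q * m + m - 1 : Nat) : Int) = (q:Int) * m + m - 1 := by
      have h5 : 1 ≤ q * m + m := by nlinarith
      push_cast [h5]
      ring
    have h1 : ((cs.length : Int) - 0 + m - 1) = ((q * m + m - 1 : Nat) : Int) := by
      rw [hq, e]; push_cast; ring
    rw [h1, show ((m:Nat):Int) = ((m:Nat):Int) from rfl, ← Int.natCast_div]
    have h2 : (q * m + m - 1) / m = q := by
      have h3 : q * m + m - 1 = m * q + (m - 1) := by rw [Nat.mul_comm m q]; omega
      rw [h3, Nat.mul_add_div (by omega), Nat.div_eq_of_lt (by omega)]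
      omega
    rw [h2]
    simp
  rw [hcnt, List.map_map]
  apply List.map_congr_left
  intro k hk
  simp only [Function.comp_apply]
  have h4 : (0 : Int) + (m : Int) * (k : Int) = ((k * m : Nat) : Int) := by push_cast; ring
  rw [h4, show ((k*m : Nat):Int) + (m:Int) = ((k*m:Nat):Int) + ((m:Nat):Int) from rfl,
     PySem.List.slice_natCast_add]

theorem pvOfListReplicate (w : List Char) : ∀ q, 1 ≤ q → PySem.Set.ofList (List.replicate q w) = [w] := by
  have haux : ∀ q, List.foldl PySem.Set.add [w] (List.replicate q w) = [w] := by
    intro q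
    induction q with
    | zero => rfl
    | succ q ih => rw [List.replicate_succ, List.foldl_cons, show PySem.Set.add [w] w = [w] by simp [PySem.Set.add, PySem.Set.contains]]; exact ih
  intro q hq
  obtain ⟨q', rfl⟩ : ∃ q', q = q' + 1 := ⟨q - 1, by omega⟩
  rw [List.replicate_succ]
  show List.foldl PySem.Set.add [] _ = [w]
  rw [List.foldl_cons, show PySem.Set.add [] w = [w] by simp [PySem.Set.add, PySem.Set.contains]]
  exact haux q'
theorem pvSetLenOne {xs : List (List Char)} (h : (PySem.Set.ofList xs).length = 1) :
    ∀ x ∈ xs, ∀ y ∈ xs, x = y := by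
  obtain ⟨c, hc⟩ := List.length_eq_one_iff.mp h
  intro x hx y hy
  have h1 := (PySem.Set.mem_ofList xs x).mpr hx
  have h2 := (PySem.Set.mem_ofList xs y).mpr hy
  rw [hc] at h1 h2
  simp at h1 h2
  rw [h1, h2]
theorem pvRotId (cs : List Char) (j : Nat) (hj : j ≤ cs.length) :
    ((cs ++ cs).drop j).take cs.length = cs.drop j ++ cs.take j := by
  rw [List.drop_append_of_le_length hj, List.take_append]
  congr 1
  · exact List.take_of_length_le (by simp)
  · congr 1; simp; omega

-- loop characterization
def pvGoodA (cs : List Char) (i : Int) : Prop :=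
  PySem.Int.mod (PySem.List.len cs) i = 0 ∧ 1 < PySem.List.len (pvPartsA cs i) ∧
  PySem.Set.len (PySem.Set.ofList (pvPartsA cs i)) = 1

theorem pvLoopA_ret (r : Int) (cs : List Char) : ∀ l, (∃ i ∈ l, pvGoodA cs i) → pvLoopA r cs l = r := by
  intro l
  induction l with
  | nil => rintro ⟨i, hi, -⟩; simp at hi
  | cons i rest ih =>
    rintro ⟨i', hi', hg⟩
    unfold pvLoopA
    rcases List.mem_cons.mp hi' with rfl | hmem
    · rw [if_neg (not_not.mpr hg.1), if_pos ⟨hg.2.1, hg.2.2⟩]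
    · by_cases h1 : PySem.Int.mod (PySem.List.len cs) i ≠ 0
      · rw [if_pos h1]; exact ih ⟨i', hmem, hg⟩
      · rw [if_neg h1]
        by_cases h2 : 1 < PySem.List.len (pvPartsA cs i) ∧
            PySem.Set.len (PySem.Set.ofList (pvPartsA cs i)) = 1
        · rw [if_pos h2]
        · rw [if_neg h2]; exact ih ⟨i', hmem, hg⟩

theorem pvLoopA_zero (r : Int) (cs : List Char) : ∀ l, (∀ i ∈ l, ¬ pvGoodA cs i) → pvLoopA r cs l = 0 := by
  intro l
  induction l with
  | nil => intro _; rfl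
  | cons i rest ih =>
    intro h
    unfold pvLoopA
    by_cases h1 : PySem.Int.mod (PySem.List.len cs) i ≠ 0
    · rw [if_pos h1]; exact ih (fun j hj => h j (List.mem_cons_of_mem _ hj))
    · rw [if_neg h1]
      have hni := h i (List.mem_cons_self)
      by_cases h2 : 1 < PySem.List.len (pvPartsA cs i) ∧
          PySem.Set.len (PySem.Set.ofList (pvPartsA cs i)) = 1
      · exact absurd ⟨not_not.mp h1, h2.1, h2.2⟩ hni
      · rw [if_neg h2]; exact ih (fun j hj => h j (List.mem_cons_of_mem _ hj))

-- A's loop succeeds iff the digit string is periodic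
theorem pvGood_iff_periodic (cs : List Char) (h2 : 2 ≤ cs.length) :
    (∃ i ∈ PySem.List.pyRange 1 (PySem.List.len cs) 1, pvGoodA cs i) ↔ pvPeriodic cs := by
  constructor
  · rintro ⟨i, hmem, hmod, hlen, hset⟩
    rw [PySem.List.len_eq] at hmem
    have hrange := (PySem.List.mem_pyRange_one).mp hmem
    set m := i.toNat with hm
    have hi : i = (m : Int) := by omega
    have hm1 : 1 ≤ m := by omega
    have hmn : m < cs.length := by omega
    have hdvd : m ∣ cs.length := by
      rw [hi, PySem.List.len_eq] at hmod
      exact_mod_cast (PySem.Int.mod_eq_zero_iff_dvd _ _).mp hmod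
    set q := cs.length / m with hqdef
    have hq : cs.length = q * m := (Nat.div_mul_cancel hdvd).symm
    have hq1 : 1 ≤ q := (Nat.one_le_div_iff (by omega)).mpr (le_of_lt hmn)
    have hparts := pvPartsA_eval cs m q hm1 hq1 hq
    rw [hi, hparts] at hlen hset
    rw [PySem.List.len_eq] at hlen
    simp only [List.length_map, List.length_range] at hlen
    have hq2 : 2 ≤ q := by exact_mod_cast hlen
    have hset1 : (PySem.Set.ofList ((List.range q).map (fun k => (cs.drop (k * m)).take m))).length = 1 := by
      have : PySem.Set.len (PySem.Set.ofList ((List.range q).map (fun k => (cs.drop (k * m)).take m)))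
          = ((PySem.Set.ofList ((List.range q).map (fun k => (cs.drop (k * m)).take m))).length : Int) :=
        PySem.List.len_eq _
      rw [this] at hset
      exact_mod_cast hset
    set w := cs.take m with hwdef
    have hwlen : w.length = m := by simp [hwdef]; omega
    have hall := pvSetLenOne hset1
    have hchunk : ∀ j < q, (cs.drop (j * m)).take m = w := by
      intro j hj
      have hjmem : (cs.drop (j * m)).take m ∈ (List.range q).map (fun k => (cs.drop (k * m)).take m) :=
        List.mem_map.mpr ⟨j, List.mem_range.mpr hj, rfl⟩
      have h0mem : w ∈ (List.range q).map (fun k => (cs.drop (k * m)).take m) :=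
        List.mem_map.mpr ⟨0, List.mem_range.mpr (by omega), by simp [hwdef]⟩
      exact hall _ hjmem _ h0mem
    refine ⟨w, q, ?_, hq2, ?_⟩
    · intro hnil; rw [hnil] at hwlen; simp at hwlen; omega
    · exact pvChunks_wpow q w cs (by rw [hwlen, hq]) (by intro j hj; rw [hwlen]; exact hchunk j hj)
  · rintro ⟨w, k, hw, hk, rfl⟩
    have hm1 : 1 ≤ w.length := List.length_pos_of_ne_nil hw
    have hn : (pvWpow w k).length = k * w.length := pvLength_wpow w k
    set m := w.length with hmdef
    have hmn : m < (pvWpow w k).length := by rw [hn]; nlinarith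
    refine ⟨(m : Int), ?_, ?_, ?_, ?_⟩
    · rw [PySem.List.len_eq]
      exact PySem.List.mem_pyRange_one.mpr ⟨by exact_mod_cast hm1, by exact_mod_cast hmn⟩
    · rw [PySem.List.len_eq]
      exact (PySem.Int.mod_eq_zero_iff_dvd _ _).mpr (Int.natCast_dvd_natCast.mpr ⟨k, by rw [hn]; ring⟩)
    · rw [pvPartsA_eval _ m k hm1 (by omega) (by rw [hn]), PySem.List.len_eq]
      simp only [List.length_map, List.length_range]
      exact_mod_cast hk
    · rw [pvPartsA_eval _ m k hm1 (by omega) (by rw [hn])]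
      have heq : (List.range k).map (fun j => ((pvWpow w k).drop (j * m)).take m) = List.replicate k w := by
        rw [List.map_congr_left (fun j hj => pvWpow_chunks w j k (List.mem_range.mp hj))]
        simp [List.map_const']
      rw [heq, pvOfListReplicate w k (by omega)]
      rfl

-- the middle of a doubled periodic word, decomposed
theorem pvMidForm (X Y Z : List Char) (hX : 1 ≤ X.length) (hZ : Z ≠ []) :
    ((X ++ Y ++ Z).drop 1).take ((X ++ Y ++ Z).length - 2) = X.drop 1 ++ Y ++ Z.dropLast := by
  have h1 : (X ++ Y ++ Z).drop 1 = X.drop 1 ++ (Y ++ Z) := by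
    rw [List.append_assoc, List.drop_append_of_le_length hX]
  rw [h1]
  have hc : (X ++ Y ++ Z).length - 2 = (X.drop 1 ++ (Y ++ Z)).length - 1 := by
    simp
    have hz1 : 1 ≤ Z.length := List.length_pos_of_ne_nil hZ
    omega
  rw [hc, ← List.dropLast_eq_take, List.dropLast_append_of_ne_nil (by simp [hZ]),
      List.dropLast_append_of_ne_nil hZ, List.append_assoc]

-- B's doubling test succeeds iff the digit string is periodic
theorem pvInfix_iff_periodic (cs : List Char) (h2 : 2 ≤ cs.length) :
    cs <:+: ((cs ++ cs).drop 1).take ((cs ++ cs).length - 2) ↔ pvPeriodic cs := by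
  have hlen2 : (cs ++ cs).length = 2 * cs.length := by simp; ring
  constructor
  · rintro ⟨u, v, huv⟩
    have hmidlen : (((cs ++ cs).drop 1).take ((cs ++ cs).length - 2)).length = 2 * cs.length - 2 := by
      simp [hlen2]; omega
    have hulen : u.length + cs.length + v.length = 2 * cs.length - 2 := by
      rw [← hmidlen, ← huv]; simp; omega
    have hub : u.length ≤ cs.length - 2 := by omega
    set j := u.length + 1 with hjdef
    have hcseq : cs = ((cs ++ cs).drop j).take cs.length := by
      have hd1 : (((cs ++ cs).drop 1).take ((cs ++ cs).length - 2)).drop u.length = cs ++ v := by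
        rw [← huv, List.append_assoc, List.drop_left]
      have hd2 : (((cs ++ cs).drop 1).take ((cs ++ cs).length - 2)).drop u.length
          = ((cs ++ cs).drop j).take ((cs ++ cs).length - 2 - u.length) := by
        rw [List.drop_take, List.drop_drop, Nat.add_comm 1 u.length]
      have hd3 : cs ++ v = ((cs ++ cs).drop j).take ((cs ++ cs).length - 2 - u.length) := by
        rw [← hd1, hd2]
      have := congrArg (List.take cs.length) hd3
      rw [List.take_left' rfl, List.take_take, min_eq_left (by rw [hlen2]; omega)] at this
      exact this
    have hrot : cs.drop j ++ cs.take j = cs := by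
      rw [← pvRotId cs j (by omega)]
      exact hcseq.symm
    have hsplit : cs.take j ++ cs.drop j = cs.drop j ++ cs.take j := by
      rw [hrot, List.take_append_drop]
    obtain ⟨w, a, b, hwa, hwb, hcond⟩ :=
      pvCommPow ((cs.take j).length + (cs.drop j).length) (cs.take j) (cs.drop j) le_rfl hsplit
    have htne : cs.take j ≠ [] := by
      intro h; have hl := congrArg List.length h; simp at hl
      rw [hl] at h2; simp at h2
    have hdne : cs.drop j ≠ [] := by
      intro h; have := congrArg List.length h; simp at this; omega
    have hwne : w ≠ [] := fun hw => htne (hcond hw)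
    have ha1 : 1 ≤ a := by
      rcases Nat.eq_zero_or_pos a with rfl | h
      · exact absurd (by rw [hwa]; rfl) htne
      · exact h
    have hb1 : 1 ≤ b := by
      rcases Nat.eq_zero_or_pos b with rfl | h
      · exact absurd (by rw [hwb]; rfl) hdne
      · exact h
    refine ⟨w, a + b, hwne, by omega, ?_⟩
    rw [← List.take_append_drop j cs, hwa, hwb, pvWpow_add]
  · rintro ⟨w, k, hw, hk, rfl⟩
    set m := w.length with hmdef
    have hm1 : 1 ≤ m := List.length_pos_of_ne_nil hw
    set cs := pvWpow w k with hcs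
    have hn : cs.length = k * m := pvLength_wpow w k
    have h0 : cs.take m = w := by
      have := pvWpow_chunks w 0 k (by omega)
      simpa using this
    have hdrop : cs.drop m = pvWpow w (k-1) := by
      conv_lhs => rw [hcs, show k = (k-1)+1 from by omega, pvWpow_succ]
      rw [hmdef, List.drop_left]
    have hrot : cs.drop m ++ cs.take m = cs := by
      rw [h0, hdrop, hcs]
      have hstep : pvWpow w (k-1) ++ w = pvWpow w ((k-1)+1) := by rw [pvWpow_add, pvWpow_one]
      rw [hstep]
      congr 1
      omega
    have hsplit : cs ++ cs = cs.take m ++ cs ++ cs.drop m := by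
      calc cs ++ cs = cs.take m ++ (cs.drop m ++ cs) := by
              rw [← List.append_assoc, List.take_append_drop]
        _ = cs.take m ++ ((cs.drop m ++ cs.take m) ++ cs.drop m) := by
              rw [List.append_assoc (cs.drop m), List.take_append_drop]
        _ = cs.take m ++ cs ++ cs.drop m := by rw [hrot, List.append_assoc]
    have hdne : cs.drop m ≠ [] := by
      intro h
      have hl := congrArg List.length h
      rw [List.length_drop, hn] at hl
      have h2m : 2 * m ≤ k * m := Nat.mul_le_mul_right m hk
      simp at hl
      omega
    have htakelen : (cs.take m).length = m := by
      rw [List.length_take, hn, min_eq_left (by nlinarith)]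
    refine ⟨(cs.take m).drop 1, (cs.drop m).dropLast, ?_⟩
    rw [hsplit, pvMidForm _ _ _ (by rw [htakelen]; omega) hdne]

-- final assembly
theorem pvMain (r : Int) : if_valid_part_2 r = if_valid_part_2_alt r := by
  unfold if_valid_part_2 if_valid_part_2_alt
  set cs := PySem.Int.toChars r with hcs
  by_cases h1 : PySem.List.len cs = 1
  · rw [if_pos h1, if_pos h1]
  · rw [if_neg h1, if_neg h1]
    have hne := pvToCharsNeNil r
    have hlen1 : 1 ≤ cs.length := List.length_pos_of_ne_nil hne
    have h2 : 2 ≤ cs.length := by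
      rcases Nat.lt_or_ge cs.length 2 with h | h
      · exfalso; apply h1; rw [PySem.List.len_eq]; omega
      · exact h
    have hmid : PySem.List.slice (cs ++ cs) (some 1) (some (-1))
        = ((cs ++ cs).drop 1).take ((cs ++ cs).length - 2) := pvSliceMid (cs ++ cs)
    by_cases hp : pvPeriodic cs
    · rw [pvLoopA_ret r cs _ ((pvGood_iff_periodic cs h2).mpr hp)]
      have : PySem.Chars.isIn cs (PySem.List.slice (cs ++ cs) (some 1) (some (-1))) = true := by
        rw [hmid]
        exact (PySem.Chars.isIn_iff_infix _ _).mpr ((pvInfix_iff_periodic cs h2).mpr hp)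
      rw [this]
      simp
    · rw [pvLoopA_zero r cs _ (fun i hi hg => hp ((pvGood_iff_periodic cs h2).mp ⟨i, hi, hg⟩))]
      have : PySem.Chars.isIn cs (PySem.List.slice (cs ++ cs) (some 1) (some (-1))) = false := by
        rw [hmid]
        exact (PySem.Chars.isIn_eq_false_iff _ _).mpr (fun hinf => hp ((pvInfix_iff_periodic cs h2).mp hinf))
      rw [this]
      simp

-- ===== VERDICT (by name: the statement is the Claim_ definition above) =====
theorem if_valid_part_2_spec : Claim_equal_if_valid_part_2 := by
  intro r _
  exact pvMain r
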